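-- pv_equiv track=rewrite | github.com/vincent-contreras/says-so-agent | backend/chat_route.py | _is_greeting
-- ===== SOURCE A (Python) =====
-- _EXACT_GREETINGS = [
--     "hi", "hello", "hey", "sup", "yo", "howdy",
--     "greetings", "good morning", "good afternoon", "good evening",
-- ]
--
-- _GREETING_FOLLOWUPS = [
--     "there", "bot", "agent", "buddy", "friend", "everyone", "all",
-- ]
--
-- def _is_greeting(text: str) -> bool:
--     lower = text.lower().strip()
--     if lower in _EXACT_GREETINGS:
--         return True
--     for g in _EXACT_GREETINGS:
--         if lower.startswith(f"{g}!") or lower.startswith(f"{g},") or lower.startswith(f"{g}."):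
--             return True
--         for f in _GREETING_FOLLOWUPS:
--             if lower == f"{g} {f}" or lower.startswith(f"{g} {f}!") or lower.startswith(f"{g} {f},"):
--                 return True
--     return False
-- ===== SOURCE B (Python) =====
-- _EXACT_GREETINGS = [
--     "hi", "hello", "hey", "sup", "yo", "howdy",
--     "greetings", "good morning", "good afternoon", "good evening",
-- ]
--
-- _GREETING_FOLLOWUPS = [
--     "there", "bot", "agent", "buddy", "friend", "everyone", "all",
-- ]
--
-- # Precomputed at module load: exact phrases, and punctuation-terminated prefixes.
-- _PHRASES = frozenset(_EXACT_GREETINGS) | frozenset(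
--     f"{g} {f}" for g in _EXACT_GREETINGS for f in _GREETING_FOLLOWUPS
-- )
-- _PREFIXES = frozenset(f"{g}{c}" for g in _EXACT_GREETINGS for c in "!,.") | frozenset(
--     f"{g} {f}{c}" for g in _EXACT_GREETINGS for f in _GREETING_FOLLOWUPS for c in "!,"
-- )
-- _MAX = max(map(len, _PREFIXES))
--
-- def _is_greeting(text: str) -> bool:
--     s = text.lower().strip()
--     if s in _PHRASES:
--         return True
--     return any(s[:i] in _PREFIXES for i in range(1, min(len(s), _MAX) + 1))
-- ===== Notes on version B (the rewrite author's own statement) =====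
-- stated objective: idiomatic
-- what changed: Replaced A's nested greeting-by-followup loops of startswith/equality tests with two frozensets built once at module load (complete phrases, and punctuation-terminated prefixes) and a single bounded scan that looks each prefix of the cleaned text up in the prefix set.
import Mathlib
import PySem

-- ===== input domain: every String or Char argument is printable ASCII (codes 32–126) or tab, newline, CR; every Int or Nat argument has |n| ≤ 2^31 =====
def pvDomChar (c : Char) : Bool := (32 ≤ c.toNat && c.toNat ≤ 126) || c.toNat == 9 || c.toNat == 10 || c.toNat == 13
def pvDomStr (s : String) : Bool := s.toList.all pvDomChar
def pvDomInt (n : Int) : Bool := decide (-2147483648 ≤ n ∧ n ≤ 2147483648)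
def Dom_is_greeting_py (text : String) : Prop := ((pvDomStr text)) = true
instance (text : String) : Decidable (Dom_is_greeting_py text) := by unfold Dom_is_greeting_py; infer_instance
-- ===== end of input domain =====

-- B replaces A's nested greeting×followup loops by two frozensets built once at module load
-- (complete phrases, and punctuation-terminated prefixes) plus a bounded prefix scan; objective: idiomatic/alternative, not faster.

def pvExactGreetings : List String :=
  ["hi", "hello", "hey", "sup", "yo", "howdy",
   "greetings", "good morning", "good afternoon", "good evening"]

def pvGreetingFollowups : List String :=
  ["there", "bot", "agent", "buddy", "friend", "everyone", "all"]

-- ===== PORT A =====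
def is_greeting_py (text : String) : Bool :=
  let lower := PySem.Str.strip (PySem.Str.lower text)
  if pvExactGreetings.contains lower then true
  else
    pvExactGreetings.any (fun g =>
      if PySem.Str.startswith lower (g ++ "!") || PySem.Str.startswith lower (g ++ ",")
          || PySem.Str.startswith lower (g ++ ".") then true
      else
        pvGreetingFollowups.any (fun f =>
          lower == (g ++ " " ++ f)
          || PySem.Str.startswith lower (g ++ " " ++ f ++ "!")
          || PySem.Str.startswith lower (g ++ " " ++ f ++ ",")))

-- ===== PORT B =====
-- _PHRASES = frozenset(_EXACT_GREETINGS) | frozenset(f"{g} {f}" …)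
def pvPhrases : PySem.Set String :=
  PySem.Set.union (PySem.Set.ofList pvExactGreetings)
    (pvExactGreetings.flatMap (fun g => pvGreetingFollowups.map (fun f => g ++ " " ++ f)))

-- _PREFIXES = frozenset(f"{g}{c}" for c in "!,.") | frozenset(f"{g} {f}{c}" for c in "!,")
def pvPrefixes : PySem.Set String :=
  PySem.Set.union
    (PySem.Set.ofList (pvExactGreetings.flatMap (fun g => ["!", ",", "."].map (fun c => g ++ c))))
    (pvExactGreetings.flatMap (fun g =>
      pvGreetingFollowups.flatMap (fun f => ["!", ","].map (fun c => g ++ " " ++ f ++ c))))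

-- _MAX = max(map(len, _PREFIXES)); pvPrefixes is a nonempty literal, so Python's max returns
-- (the .getD 0 default is unreachable).
def pvMax : Int :=
  (PySem.List.max? (pvPrefixes.map PySem.Str.len) (fun n => n)).getD 0

def is_greeting_py_alt (text : String) : Bool :=
  let s := PySem.Str.strip (PySem.Str.lower text)
  if PySem.Set.contains pvPhrases s then true
  else
    (PySem.List.pyRange 1 (min (PySem.Str.len s) pvMax + 1) 1).any
      (fun i => PySem.Set.contains pvPrefixes (PySem.Str.slice s none (some i)))

-- ===== PRECONDITION & SPEC =====
def Spec_is_greeting_py (text : String) (out : Bool) : Prop := out = is_greeting_py_alt text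
instance (text : String) (out : Bool) : Decidable (Spec_is_greeting_py text out) := by unfold Spec_is_greeting_py; infer_instance

-- ===== CLAIM (what is proved, stated in full; the proofs are below) =====
def Claim_equal_is_greeting_py : Prop := ∀ (text : String), Dom_is_greeting_py text → Spec_is_greeting_py text (is_greeting_py text)

-- ===== LEMMAS AND PROOFS =====


-- Generic form of B's bounded prefix scan: it hits exactly when some stored prefix is a prefix of s.
theorem pvScan (M : Int) (P : PySem.Set String) (s : String)
    (hlen : ∀ p ∈ P, 1 ≤ p.toList.length ∧ (p.toList.length : Int) ≤ M) :
    ((PySem.List.pyRange 1 (min (PySem.Str.len s) M + 1) 1).any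
      (fun i => PySem.Set.contains P (PySem.Str.slice s none (some i))) = true)
    ↔ ∃ p ∈ P, p.toList <+: s.toList := by
  simp only [List.any_eq_true, PySem.List.mem_pyRange_one, PySem.Set.contains_iff]
  constructor
  · rintro ⟨i, ⟨h1, _⟩, hmem⟩
    refine ⟨_, hmem, ?_⟩
    have h0 : (0:Int) ≤ i := by omega
    rw [show (PySem.Str.slice s none (some i)).toList = s.toList.take i.toNat by
      simp [PySem.Str.slice, PySem.List.slice_to _ h0]]
    exact List.take_prefix _ _
  · rintro ⟨p, hp, hpre⟩
    refine ⟨(p.toList.length : Int), ⟨?_, ?_⟩, ?_⟩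
    · have := (hlen p hp).1; omega
    · have h1 := (hlen p hp).2
      have h2 : p.toList.length ≤ s.toList.length := hpre.length_le
      have h3 : PySem.Str.len s = (s.toList.length : Int) := by simp [pysem]
      omega
    · have : (PySem.Str.slice s none (some (p.toList.length : Int))) = p := by
        apply String.toList_inj.mp
        rw [show (PySem.Str.slice s none (some ((p.toList.length : Nat) : Int))).toList
            = s.toList.take p.toList.length by
          simp [PySem.Str.slice, PySem.List.slice_to _ (Int.natCast_nonneg _), Int.toNat_natCast]]
        exact (List.prefix_iff_eq_take.mp hpre).symm
      rw [this]; exact hp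

set_option maxRecDepth 4096 in
theorem pvPrefixes_len : ∀ p ∈ pvPrefixes, 1 ≤ p.toList.length ∧ p.toList.length ≤ 24 := by decide

set_option maxRecDepth 4096 in
theorem pvMax_eq : pvMax = 24 := by decide

theorem pv_core (s : String) :
    (if pvExactGreetings.contains s then true
     else
       pvExactGreetings.any (fun g =>
         if PySem.Str.startswith s (g ++ "!") || PySem.Str.startswith s (g ++ ",")
             || PySem.Str.startswith s (g ++ ".") then true
         else
           pvGreetingFollowups.any (fun f =>
             s == (g ++ " " ++ f)
             || PySem.Str.startswith s (g ++ " " ++ f ++ "!")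
             || PySem.Str.startswith s (g ++ " " ++ f ++ ","))))
    =
    (if PySem.Set.contains pvPhrases s then true
     else
       (PySem.List.pyRange 1 (min (PySem.Str.len s) pvMax + 1) 1).any
         (fun i => PySem.Set.contains pvPrefixes (PySem.Str.slice s none (some i)))) := by
  have hscan := pvScan pvMax pvPrefixes s (fun p hp =>
    ⟨(pvPrefixes_len p hp).1, by
      have := (pvPrefixes_len p hp).2; rw [pvMax_eq]; exact_mod_cast this⟩)
  rw [Bool.eq_iff_iff]
  simp only [Bool.if_true_left, Bool.or_eq_true, List.any_eq_true,
    List.contains_iff_mem, beq_iff_eq, PySem.Set.contains_iff, hscan,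
    PySem.Str.startswith_eq, PySem.Chars.startswith_iff]
  simp only [pvPhrases, pvPrefixes, PySem.Set.mem_union, PySem.Set.mem_ofList,
    List.mem_flatMap, List.mem_map, List.mem_cons, List.not_mem_nil, or_false,
    String.toList_append, decide_eq_true_eq]
  constructor
  · rintro (h | ⟨g, hg, ((h1 | h2) | h3) | ⟨f, hf, (he | h4) | h5⟩⟩)
    · exact Or.inl (Or.inl h)
    · exact Or.inr ⟨_, Or.inl ⟨g, hg, _, Or.inl rfl, rfl⟩, by simpa using h1⟩
    · exact Or.inr ⟨_, Or.inl ⟨g, hg, _, Or.inr (Or.inl rfl), rfl⟩, by simpa using h2⟩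
    · exact Or.inr ⟨_, Or.inl ⟨g, hg, _, Or.inr (Or.inr rfl), rfl⟩, by simpa using h3⟩
    · exact Or.inl (Or.inr ⟨g, hg, f, hf, he.symm⟩)
    · exact Or.inr ⟨_, Or.inr ⟨g, hg, f, hf, _, Or.inl rfl, rfl⟩, by simpa using h4⟩
    · exact Or.inr ⟨_, Or.inr ⟨g, hg, f, hf, _, Or.inr rfl, rfl⟩, by simpa using h5⟩
  · rintro ((h | ⟨g, hg, f, hf, hp⟩) | ⟨p, (⟨g, hg, c, hc, rfl⟩ | ⟨g, hg, f, hf, c, hc, rfl⟩), hpre⟩)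
    · exact Or.inl h
    · exact Or.inr ⟨g, hg, Or.inr ⟨f, hf, Or.inl (Or.inl hp.symm)⟩⟩
    · rcases hc with rfl | rfl | rfl
      · exact Or.inr ⟨g, hg, Or.inl (Or.inl (Or.inl (by simpa using hpre)))⟩
      · exact Or.inr ⟨g, hg, Or.inl (Or.inl (Or.inr (by simpa using hpre)))⟩
      · exact Or.inr ⟨g, hg, Or.inl (Or.inr (by simpa using hpre))⟩
    · rcases hc with rfl | rfl
      · exact Or.inr ⟨g, hg, Or.inr ⟨f, hf, Or.inl (Or.inr (by simpa using hpre))⟩⟩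
      · exact Or.inr ⟨g, hg, Or.inr ⟨f, hf, Or.inr (by simpa using hpre)⟩⟩

-- ===== VERDICT (by name: the statement is the Claim_ definition above) =====
theorem is_greeting_py_spec : Claim_equal_is_greeting_py := by
  intro text _
  unfold Spec_is_greeting_py is_greeting_py is_greeting_py_alt
  exact pv_core (PySem.Str.strip (PySem.Str.lower text))
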